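-- pv_equiv track=rewrite | github.com/TremeschinArchive/ModularMusicVisualizer | mmv_skia/mmv/common/cmn_utils.py | shorten_overlaps_keep_start_value
-- ===== SOURCE A (Python) =====
-- def shorten_overlaps_keep_start_value(intervals: list) -> list:
--
--     # Join multiple same start value intervals into the maximum one
--
--     # Sort list by first item of lists
--     intervals = sorted(intervals, key = lambda k: k[0])
--
--     # Groups of value : values for every value
--     groups = {}
--
--     for item in intervals:
--
--         # Add item[1] to each group item[0]
--         if not item[0] in groups:
--             groups[item[0]] = []
--
--         # Add the value of this interval until value to groups
--         groups[item[0]].append(item[1])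
--
--     # Reset L to this index : max(group[this index])
--     # In case we have [10, 12] [10, 13] [10, 18] [10, 16],
--     # it'll be {10: [12, 13, 18, 16]} and we set to [10, 18] because that's the max length
--     intervals = [ [k, max(groups[k])] for k in groups.keys() ]
--
--     # Check for actual overlaps
--
--     # List of index : new internal at that index
--     patches = []
--
--     # As we'll check every N with N+1, loop until N-1 so we don't get IndexError
--     for n in range(len(intervals) - 1):
--
--         # .. [4, 6] [5, 8] .. As you can see, the first list's second value
--         # is greater than next list's first value, this is the next conditional
--         if intervals[n][1] > intervals[n+1][0]:
--
--             # The new interval we insert at that point will be starting at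
--             # first list's start and ends on second's list start
--             new_interval = [intervals[n][0], intervals[n+1][0]]
--
--             # Add that patch
--             patches.append([n, new_interval])
--
--     # For not scrambling the indexes, we have to patch in reverse
--     for n in reversed(patches):
--         # Substitute the interval
--         intervals[n[0]] = n[1]
--
--     return intervals
-- ===== SOURCE B (Python) =====
-- def shorten_overlaps_keep_start_value(intervals: list) -> list:
--     # One linear pass over the sorted intervals: merge equal starts to the max end,
--     # and clamp a finished entry's end down to the next start when it overlaps.
--     result = []
--     for item in sorted(intervals, key=lambda k: k[0]):
--         s, e = item[0], item[1]
--         if result and result[-1][0] == s: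
--             if e > result[-1][1]:
--                 result[-1][1] = e
--         else:
--             if result and result[-1][1] > s:
--                 result[-1][1] = s
--             result.append([s, e])
--     return result
-- ===== Notes on version B (the rewrite author's own statement) =====
-- stated objective: simpler
-- what changed: A's four phases (group-by-start dict, rebuild with per-key max, collect overlap patches into a list, apply them in reverse by index) are replaced by a single linear pass over the sorted list that merges equal starts to the max end and clamps the just-finished entry's end down to the next start as it goes.
import Mathlib
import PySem

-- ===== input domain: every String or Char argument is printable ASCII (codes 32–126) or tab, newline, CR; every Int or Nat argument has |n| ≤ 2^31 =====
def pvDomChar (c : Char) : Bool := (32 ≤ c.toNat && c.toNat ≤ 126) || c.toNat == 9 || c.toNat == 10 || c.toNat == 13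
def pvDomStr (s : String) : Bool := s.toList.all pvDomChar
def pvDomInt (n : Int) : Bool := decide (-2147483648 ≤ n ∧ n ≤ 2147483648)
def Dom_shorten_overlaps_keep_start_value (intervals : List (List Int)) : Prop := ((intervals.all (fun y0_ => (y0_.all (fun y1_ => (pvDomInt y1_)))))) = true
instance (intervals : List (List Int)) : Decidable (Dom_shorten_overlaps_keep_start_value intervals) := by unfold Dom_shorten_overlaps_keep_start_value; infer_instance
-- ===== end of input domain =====

-- B rewrites A's four-phase pipeline (group-by-start dict, rebuild with max, collect overlap
-- patches, apply them in reverse) as ONE pass over the sorted list that merges equal starts and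
-- clamps the previous entry as it goes (objective: simpler). Equality of return values is proved.

-- ===== PORT A =====
-- max(xs) for the nonempty value lists A's dict holds (the .getD 0 default is never reached there)
def pvMax (xs : List Int) : Int := (PySem.List.max? xs (fun y => y)).getD 0

def shorten_overlaps_keep_start_value (intervals : List (List Int)) : List (List Int) :=
  -- intervals = sorted(intervals, key = lambda k: k[0])
  let ivs := PySem.List.sorted intervals (fun k => PySem.List.pyGetD k 0 0) false
  -- groups = {} ; for item in intervals: …
  let groups : PySem.Dict Int (List Int) := ivs.foldl (fun groups item =>
      let k := PySem.List.pyGetD item 0 0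
      let groups := if groups.contains k then groups else groups.insert k []
      groups.modify k [] (fun vs => vs ++ [PySem.List.pyGetD item 1 0])) PySem.Dict.empty
  -- intervals = [ [k, max(groups[k])] for k in groups.keys() ]
  let ivs2 := groups.keys.map (fun k => [k, pvMax (groups.getD k [])])
  -- patches = [] ; for n in range(len(intervals) - 1): …
  let patches := (PySem.List.pyRange 0 ((ivs2.length : Int) - 1) 1).foldl (fun ps n =>
      if PySem.List.pyGetD (PySem.List.pyGetD ivs2 n []) 1 0 >
         PySem.List.pyGetD (PySem.List.pyGetD ivs2 (n + 1) []) 0 0 then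
        ps ++ [(n, [PySem.List.pyGetD (PySem.List.pyGetD ivs2 n []) 0 0,
                    PySem.List.pyGetD (PySem.List.pyGetD ivs2 (n + 1) []) 0 0])]
      else ps) ([] : List (Int × List Int))
  -- for n in reversed(patches): intervals[n[0]] = n[1]
  patches.reverse.foldl (fun l p => l.set p.1.toNat p.2) ivs2

-- ===== PORT B =====
def shorten_overlaps_keep_start_value_alt (intervals : List (List Int)) : List (List Int) :=
  -- result is kept in REVERSE order (head = Python's result[-1]); its rows are (start, end)
  -- pairs (B's rows are exactly [s, e]) rendered as [start, end] after the final reverse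
  let res := (PySem.List.sorted intervals (fun k => PySem.List.pyGetD k 0 0) false).foldl
    (fun res item =>
      let s := PySem.List.pyGetD item 0 0
      let e := PySem.List.pyGetD item 1 0
      match res with
      | (k, m) :: t =>
          if k = s then
            (if e > m then (k, e) :: t else (k, m) :: t)
          else
            let t' := if m > s then (k, s) :: t else (k, m) :: t
            (s, e) :: t'
      | [] => [(s, e)]) ([] : List (Int × Int))
  res.reverse.map (fun p => [p.1, p.2])

-- ===== PRECONDITION & SPEC =====
-- Python A raises IndexError when some interval has fewer than two entries (k[0] in the sort
-- key, item[1] in the grouping loop); exactly those inputs are excluded.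
def Pre_shorten_overlaps_keep_start_value (intervals : List (List Int)) : Prop :=
  ∀ l ∈ intervals, 2 ≤ l.length
instance (intervals : List (List Int)) : Decidable (Pre_shorten_overlaps_keep_start_value intervals) := by unfold Pre_shorten_overlaps_keep_start_value; infer_instance

def pvWitness_shorten_overlaps_keep_start_value : List (List Int) :=
  [[10, 12], [4, 6], [10, 18], [5, 8], [10, 16]]

def Spec_shorten_overlaps_keep_start_value (intervals : List (List Int)) (out : List (List Int)) : Prop := out = shorten_overlaps_keep_start_value_alt intervals
instance (intervals : List (List Int)) (out : List (List Int)) : Decidable (Spec_shorten_overlaps_keep_start_value intervals out) := by unfold Spec_shorten_overlaps_keep_start_value; infer_instance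

-- ===== CLAIM (what is proved, stated in full; the proofs are below) =====
def Claim_equal_shorten_overlaps_keep_start_value : Prop := ∀ (intervals : List (List Int)), Dom_shorten_overlaps_keep_start_value intervals → Pre_shorten_overlaps_keep_start_value intervals → Spec_shorten_overlaps_keep_start_value intervals (shorten_overlaps_keep_start_value intervals)

-- ===== LEMMAS AND PROOFS =====

-- (start, end) projection of a row, and its rendering back to a row
def pvPair (l : List Int) : Int × Int := (PySem.List.pyGetD l 0 0, PySem.List.pyGetD l 1 0)
def pvRow (p : Int × Int) : List Int := [p.1, p.2]
def pvGStep (d : PySem.Dict Int (List Int)) (p : Int × Int) : PySem.Dict Int (List Int) :=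
  let d' := if d.contains p.1 then d else d.insert p.1 []
  d'.modify p.1 [] (fun vs => vs ++ [p.2])
theorem pvGStep_same (l₀ : List (Int × List Int)) (c : Int) (acc : List Int) (v : Int)
    (h : ∀ q ∈ l₀, q.1 ≠ c) :
    pvGStep (PySem.Dict.mk (l₀ ++ [(c, acc)])) (c, v) = PySem.Dict.mk (l₀ ++ [(c, acc ++ [v])]) := by
  have hc : (PySem.Dict.mk (l₀ ++ [(c, acc)])).contains c = true := by
    simp [PySem.Dict.contains]
  have hf : List.find? (fun p => p.1 == c) (l₀ ++ [(c, acc)]) = some (c, acc) := by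
    rw [List.find?_append]
    have hn : List.find? (fun p => p.1 == c) l₀ = none := by
      rw [List.find?_eq_none]; intro q hq; simpa using h q hq
    simp [hn]
  have hmap : l₀.map (fun p => if p.1 == c then (c, acc ++ [v]) else p) = l₀ := by
    conv_rhs => rw [← List.map_id l₀]
    exact List.map_congr_left (fun q hq => by simp [h q hq])
  simp only [pvGStep, hc, if_true]
  simp only [PySem.Dict.modify, PySem.Dict.getD, PySem.Dict.get?, hf]
  simp only [PySem.Dict.insert, hc, if_true]
  simp only [Option.map_some, Option.getD_some]
  rw [List.map_append, hmap]
  simp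
theorem pvGStep_fresh (l₀ : List (Int × List Int)) (c : Int) (v : Int)
    (h : ∀ q ∈ l₀, q.1 ≠ c) :
    pvGStep (PySem.Dict.mk l₀) (c, v) = PySem.Dict.mk (l₀ ++ [(c, [v])]) := by
  have hc : (PySem.Dict.mk l₀).contains c = false := by
    simp only [PySem.Dict.contains, List.any_eq_false]
    intro q hq; simpa using h q hq
  have hmap : l₀.map (fun p => if p.1 == c then (c, [v]) else p) = l₀ := by
    conv_rhs => rw [← List.map_id l₀]
    exact List.map_congr_left (fun q hq => by simp [h q hq])
  have hf : List.find? (fun p => p.1 == c) (l₀ ++ [(c, [])]) = some (c, []) := by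
    rw [List.find?_append]
    have hn : List.find? (fun p => p.1 == c) l₀ = none := by
      rw [List.find?_eq_none]; intro q hq; simpa using h q hq
    simp [hn]
  have hc2 : (PySem.Dict.mk (l₀ ++ [(c, [])])).contains c = true := by
    simp [PySem.Dict.contains]
  simp only [pvGStep, hc, if_false, Bool.false_eq_true]
  simp only [PySem.Dict.insert, hc, Bool.false_eq_true, if_false]
  simp only [PySem.Dict.modify, PySem.Dict.getD, PySem.Dict.get?, hf]
  simp only [PySem.Dict.insert, hc2, if_true]
  simp only [Option.map_some, Option.getD_some, List.nil_append]
  rw [List.map_append, hmap]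
  simp

def pvRunsV (k : Int) (acc : List Int) : List (Int × Int) → List (Int × List Int)
  | [] => [(k, acc)]
  | (k', v) :: r => if k' = k then pvRunsV k (acc ++ [v]) r else (k, acc) :: pvRunsV k' [v] r

theorem pvGroups_eq (xs : List (Int × Int)) :
    ∀ (k : Int) (acc : List Int) (l₀ : List (Int × List Int)),
      xs.Pairwise (fun a b => a.1 ≤ b.1) → (∀ p ∈ xs, k ≤ p.1) → (∀ q ∈ l₀, q.1 < k) →
      xs.foldl pvGStep (PySem.Dict.mk (l₀ ++ [(k, acc)])) = PySem.Dict.mk (l₀ ++ pvRunsV k acc xs) := by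
  induction xs with
  | nil => intro k acc l₀ _ _ _; simp [pvRunsV]
  | cons p r ih =>
    intro k acc l₀ hpw hge hlt
    obtain ⟨k', v⟩ := p
    have hk'r : ∀ q ∈ r, k' ≤ q.1 := by
      intro q hq; exact (List.pairwise_cons.mp hpw).1 q hq
    have hpwr := (List.pairwise_cons.mp hpw).2
    by_cases hkk : k' = k
    · subst hkk
      rw [List.foldl_cons, pvGStep_same l₀ k' acc v (fun q hq => ne_of_lt (hlt q hq))]
      · simp only [pvRunsV, if_pos rfl]
        exact ih k' (acc ++ [v]) l₀ hpwr hk'r hlt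
    · have hklt : k < k' := lt_of_le_of_ne (hge (k', v) (by simp)) (Ne.symm hkk)
      rw [List.foldl_cons]
      have hfresh : ∀ q ∈ l₀ ++ [(k, acc)], q.1 ≠ k' := by
        intro q hq
        rcases List.mem_append.mp hq with h1 | h1
        · exact ne_of_lt (lt_trans (hlt q h1) hklt)
        · simp at h1; subst h1; exact ne_of_lt hklt
      rw [pvGStep_fresh (l₀ ++ [(k, acc)]) k' v hfresh]
      simp only [pvRunsV, if_neg hkk]
      have := ih k' [v] (l₀ ++ [(k, acc)]) hpwr hk'r (by
        intro q hq
        rcases List.mem_append.mp hq with h1 | h1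
        · exact lt_trans (hlt q h1) hklt
        · simp at h1; subst h1; exact hklt)
      rw [this, List.append_assoc]
      simp

theorem pvMax_append (acc : List Int) (v : Int) (h : acc ≠ []) :
    pvMax (acc ++ [v]) = max (pvMax acc) v := by
  obtain ⟨x, t, rfl⟩ := List.exists_cons_of_ne_nil h
  simp [pvMax, PySem.List.max?_id_cons, List.foldl_append]

theorem pvRunsV_keys_ge (xs : List (Int × Int)) :
    ∀ (k : Int) (acc : List Int), xs.Pairwise (fun a b => a.1 ≤ b.1) → (∀ p ∈ xs, k ≤ p.1) →
      ∀ q ∈ pvRunsV k acc xs, k ≤ q.1 := by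
  induction xs with
  | nil => intro k acc _ _ q hq; simp [pvRunsV] at hq; simp [hq]
  | cons p r ih =>
    intro k acc hpw hge q hq
    obtain ⟨k', v⟩ := p
    have hk'r : ∀ p ∈ r, k' ≤ p.1 := fun p hp => (List.pairwise_cons.mp hpw).1 p hp
    have hpwr := (List.pairwise_cons.mp hpw).2
    by_cases hkk : k' = k
    · subst hkk
      simp only [pvRunsV, if_pos rfl] at hq
      exact ih k' (acc ++ [v]) hpwr hk'r q hq
    · simp only [pvRunsV, if_neg hkk] at hq
      have hk' : k ≤ k' := hge (k', v) (by simp)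
      rcases List.mem_cons.mp hq with hq1 | hq1
      · simp [hq1]
      · exact le_trans hk' (ih k' [v] hpwr hk'r q hq1)

theorem pvRunsV_keys_lt (xs : List (Int × Int)) :
    ∀ (k : Int) (acc : List Int), xs.Pairwise (fun a b => a.1 ≤ b.1) → (∀ p ∈ xs, k ≤ p.1) →
      ((pvRunsV k acc xs).map Prod.fst).Pairwise (· < ·) := by
  induction xs with
  | nil => intro k acc _ _; simp [pvRunsV]
  | cons p r ih =>
    intro k acc hpw hge
    obtain ⟨k', v⟩ := p
    have hk'r : ∀ p ∈ r, k' ≤ p.1 := fun p hp => (List.pairwise_cons.mp hpw).1 p hp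
    have hpwr := (List.pairwise_cons.mp hpw).2
    by_cases hkk : k' = k
    · subst hkk
      simp only [pvRunsV, if_pos rfl]
      exact ih k' (acc ++ [v]) hpwr hk'r
    · have hklt : k < k' := lt_of_le_of_ne (hge (k', v) (by simp)) (Ne.symm hkk)
      simp only [pvRunsV, if_neg hkk, List.map_cons]
      rw [List.pairwise_cons]
      refine ⟨?_, ih k' [v] hpwr hk'r⟩
      intro b hb
      obtain ⟨q, hq, rfl⟩ := List.mem_map.mp hb
      exact lt_of_lt_of_le hklt (pvRunsV_keys_ge r k' [v] hpwr hk'r q hq)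

def pvRunsGo (k m : Int) : List (Int × Int) → List (Int × Int)
  | [] => [(k, m)]
  | (k', v) :: r => if k' = k then pvRunsGo k (max m v) r else (k, m) :: pvRunsGo k' v r

theorem pvRunsV_max (xs : List (Int × Int)) :
    ∀ (k : Int) (acc : List Int), acc ≠ [] →
      (pvRunsV k acc xs).map (fun q => (q.1, pvMax q.2)) = pvRunsGo k (pvMax acc) xs := by
  induction xs with
  | nil => intro k acc _; simp [pvRunsV, pvRunsGo]
  | cons p r ih =>
    intro k acc hne
    obtain ⟨k', v⟩ := p
    by_cases hkk : k' = k
    · subst hkk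
      rw [show pvRunsV k' acc ((k', v) :: r) = pvRunsV k' (acc ++ [v]) r from by simp [pvRunsV],
          show pvRunsGo k' (pvMax acc) ((k', v) :: r) = pvRunsGo k' (max (pvMax acc) v) r from by simp [pvRunsGo],
          ih k' (acc ++ [v]) (by simp), pvMax_append acc v hne]
    · simp only [pvRunsV, pvRunsGo, if_neg hkk, List.map_cons]
      rw [ih k' [v] (by simp)]
      rfl

def pvClamp : List (Int × Int) → List (Int × Int)
  | [] => []
  | [p] => [p]
  | (k, m) :: (k', m') :: r => (k, if k' < m then k' else m) :: pvClamp ((k', m') :: r)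

def pvBStep (res : List (Int × Int)) (p : Int × Int) : List (Int × Int) :=
  match res with
  | (k, m) :: t =>
      if k = p.1 then (if p.2 > m then (k, p.2) :: t else (k, m) :: t)
      else
        let t' := if m > p.1 then (k, p.1) :: t else (k, m) :: t
        (p.1, p.2) :: t'
  | [] => [(p.1, p.2)]

theorem pvRunsGo_head (k m : Int) (xs : List (Int × Int)) :
    ∃ m' r', pvRunsGo k m xs = (k, m') :: r' := by
  induction xs generalizing k m with
  | nil => exact ⟨m, [], rfl⟩
  | cons p r ih =>
    obtain ⟨k', v⟩ := p
    by_cases h : k' = k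
    · simpa [pvRunsGo, h] using ih k (max m v)
    · exact ⟨m, pvRunsGo k' v r, by simp [pvRunsGo, h]⟩

theorem pvBFold (xs : List (Int × Int)) :
    ∀ (k m : Int) (t : List (Int × Int)),
      xs.Pairwise (fun a b => a.1 ≤ b.1) → (∀ p ∈ xs, k ≤ p.1) →
      xs.foldl pvBStep ((k, m) :: t) = (pvClamp (pvRunsGo k m xs)).reverse ++ t := by
  induction xs with
  | nil => intro k m t _ _; simp [pvRunsGo, pvClamp]
  | cons p r ih =>
    intro k m t hpw hge
    obtain ⟨s, e⟩ := p
    have hsr : ∀ p ∈ r, s ≤ p.1 := fun p hp => (List.pairwise_cons.mp hpw).1 p hp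
    have hpwr := (List.pairwise_cons.mp hpw).2
    rw [List.foldl_cons]
    by_cases hks : k = s
    · subst hks
      have hstep : pvBStep ((k, m) :: t) (k, e) = (k, max m e) :: t := by
        simp only [pvBStep, if_pos rfl]
        by_cases h : e > m
        · simp [h, max_eq_right (le_of_lt h)]
        · simp [h, max_eq_left (le_of_not_gt h)]
      rw [hstep, ih k (max m e) t hpwr hsr]
      simp [pvRunsGo]
    · have hklt : k < s := lt_of_le_of_ne (hge (s, e) (by simp)) hks
      have hstep : pvBStep ((k, m) :: t) (s, e) = (s, e) :: (k, if s < m then s else m) :: t := by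
        simp only [pvBStep, if_neg hks]
        by_cases h : m > s
        · simp [h, gt_iff_lt]
        · have h' : ¬ s < m := by simpa [gt_iff_lt] using h
          simp [h', h]
      rw [hstep, ih s e ((k, if s < m then s else m) :: t) hpwr hsr]
      have hne : ¬ s = k := fun h => hks h.symm
      simp only [pvRunsGo, if_neg hne]
      obtain ⟨m', r', hr⟩ := pvRunsGo_head s e r
      rw [hr]
      show (pvClamp ((s, m') :: r')).reverse ++ ((k, if s < m then s else m) :: t) =
        (pvClamp ((k, m) :: (s, m') :: r')).reverse ++ t
      rw [show pvClamp ((k, m) :: (s, m') :: r') = (k, if s < m then s else m) :: pvClamp ((s, m') :: r') from rfl]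
      simp

theorem pvClamp_len (rs : List (Int × Int)) : (pvClamp rs).length = rs.length := by
  induction rs with
  | nil => rfl
  | cons p r ih =>
    obtain ⟨k, m⟩ := p
    cases r with
    | nil => rfl
    | cons q r' =>
      obtain ⟨k', m'⟩ := q
      simp only [pvClamp, List.length_cons]
      simpa using ih

theorem pvClamp_getElem (rs : List (Int × Int)) (i : Nat) (hi : i < rs.length) :
    (pvClamp rs)[i]'(by rw [pvClamp_len]; exact hi) =
      if h : i + 1 < rs.length then
        (rs[i].1, if rs[i + 1].1 < rs[i].2 then rs[i + 1].1 else rs[i].2)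
      else rs[i] := by
  induction rs generalizing i with
  | nil => simp at hi
  | cons p r ih =>
    obtain ⟨k, m⟩ := p
    cases r with
    | nil =>
      cases i with
      | zero => simp [pvClamp]
      | succ j => simp at hi
    | cons q r' =>
      obtain ⟨k', m'⟩ := q
      cases i with
      | zero => simp [pvClamp]
      | succ j =>
        have hj : j < ((k', m') :: r').length := by simpa using hi
        have := ih j hj
        simp only [pvClamp, List.getElem_cons_succ]
        rw [this]
        simp only [List.length_cons]
        by_cases h2 : j + 1 < r'.length + 1
        · rw [dif_pos h2, dif_pos (by omega)]
          simp
        · rw [dif_neg h2, dif_neg (by omega)]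

theorem pvApply_len (ps : List (Int × List Int)) (l : List (List Int)) :
    (ps.foldl (fun l p => l.set p.1.toNat p.2) l).length = l.length := by
  induction ps generalizing l with
  | nil => rfl
  | cons p ps ih => rw [List.foldl_cons, ih, List.length_set]

theorem pvApply_not_mem (qs : List Nat) (g : Nat → List Int) (l : List (List Int)) (i : Nat)
    (h : i ∉ qs) :
    ((qs.map (fun n : Nat => ((n : Int), g n))).foldl (fun l p => l.set p.1.toNat p.2) l)[i]? = l[i]? := by
  induction qs generalizing l with
  | nil => rfl
  | cons n qs ih =>
    simp only [List.map_cons, List.foldl_cons, Int.toNat_natCast]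
    rw [ih (l.set n (g n)) (fun hm => h (List.mem_cons_of_mem _ hm))]
    have hne : i ≠ n := fun he => h (he ▸ List.mem_cons_self)
    rw [List.getElem?_set_ne (by omega)]

theorem pvApply_mem (qs : List Nat) (g : Nat → List Int) (l : List (List Int)) (i : Nat)
    (hnd : qs.Nodup) (hlt : ∀ n ∈ qs, n < l.length) (h : i ∈ qs) :
    ((qs.map (fun n : Nat => ((n : Int), g n))).foldl (fun l p => l.set p.1.toNat p.2) l)[i]? = some (g i) := by
  induction qs generalizing l with
  | nil => simp at h
  | cons n qs ih =>
    simp only [List.map_cons, List.foldl_cons, Int.toNat_natCast]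
    rcases List.mem_cons.mp h with rfl | hm
    · have hni : i ∉ qs := (List.nodup_cons.mp hnd).1
      rw [pvApply_not_mem qs g _ i hni]
      rw [List.getElem?_set_self' ]
      have : i < l.length := hlt i (by simp)
      simp [List.getElem?_eq_getElem, this]
    · exact ih (l.set n (g n)) ((List.nodup_cons.mp hnd).2) (fun n' hn' => by rw [List.length_set]; exact hlt n' (List.mem_cons_of_mem _ hn')) hm


def pvRuns : List (Int × Int) → List (Int × Int)
  | [] => []
  | (k, v) :: r => pvRunsGo k v r

def pvRunsVTop : List (Int × Int) → List (Int × List Int)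
  | [] => []
  | (k, v) :: r => pvRunsV k [v] r

-- the common normal form both ports are reduced to
def pvNorm (ivs : List (List Int)) : List (List Int) :=
  (pvClamp (pvRuns (ivs.map pvPair))).map pvRow

theorem pvPatchPos (rs : List (Int × Int)) (hL1 : 1 ≤ rs.length) :
    (((PySem.List.pyRange 0 (((rs.map pvRow).length : Int) - 1) 1).foldl (fun ps n =>
      if PySem.List.pyGetD (PySem.List.pyGetD (rs.map pvRow) n []) 1 0 >
         PySem.List.pyGetD (PySem.List.pyGetD (rs.map pvRow) (n + 1) []) 0 0 then
        ps ++ [(n, [PySem.List.pyGetD (PySem.List.pyGetD (rs.map pvRow) n []) 0 0,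
                    PySem.List.pyGetD (PySem.List.pyGetD (rs.map pvRow) (n + 1) []) 0 0])]
      else ps) ([] : List (Int × List Int))).reverse.foldl (fun l p => l.set p.1.toNat p.2)
        (rs.map pvRow)) = (pvClamp rs).map pvRow := by
  set l := rs.map pvRow with hl
  have hlen : l.length = rs.length := by rw [hl]; exact List.length_map ..
  have hval : ∀ (j : Nat) (hj : j < rs.length), PySem.List.pyGetD l (j : Int) [] = pvRow (rs[j]'hj) := by
    intro j hj
    rw [PySem.List.pyGetD_natCast, hl, List.getD_eq_getElem?_getD, List.getElem?_map,
        List.getElem?_eq_getElem hj]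
    rfl
  have hrow0 : ∀ p : Int × Int, PySem.List.pyGetD (pvRow p) 0 0 = p.1 := by
    intro p; simp [pvRow, PySem.List.pyGetD_ofNat']
  have hrow1 : ∀ p : Int × Int, PySem.List.pyGetD (pvRow p) 1 0 = p.2 := by
    intro p; simp [pvRow, PySem.List.pyGetD_ofNat']
  have hstop : ((l.length : Int) - 1) = ((rs.length - 1 : Nat) : Int) := by
    rw [hlen]; omega
  rw [hstop, PySem.List.pyRange_zero_natCast]
  rw [PySem.List.foldl_append_ite
      (p := fun n : Int => PySem.List.pyGetD (PySem.List.pyGetD l n []) 1 0 >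
        PySem.List.pyGetD (PySem.List.pyGetD l (n + 1) []) 0 0)
      (f := fun n : Int => (n, [PySem.List.pyGetD (PySem.List.pyGetD l n []) 0 0,
        PySem.List.pyGetD (PySem.List.pyGetD l (n + 1) []) 0 0]))]
  rw [List.nil_append, List.filter_map, List.map_map, ← List.map_reverse]
  have hfun : ((fun n : Int => (n, [PySem.List.pyGetD (PySem.List.pyGetD l n []) 0 0,
        PySem.List.pyGetD (PySem.List.pyGetD l (n + 1) []) 0 0])) ∘ (fun k : Nat => (k : Int)))
      = (fun j : Nat => ((j : Int), [PySem.List.pyGetD (PySem.List.pyGetD l (j : Int) []) 0 0,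
        PySem.List.pyGetD (PySem.List.pyGetD l ((j : Int) + 1) []) 0 0])) := rfl
  rw [hfun]
  set g : Nat → List Int := fun j => [PySem.List.pyGetD (PySem.List.pyGetD l (j : Int) []) 0 0,
    PySem.List.pyGetD (PySem.List.pyGetD l ((j : Int) + 1) []) 0 0] with hg
  set qs : List Nat := ((List.range (rs.length - 1)).filter
    ((fun x : Int => decide (PySem.List.pyGetD (PySem.List.pyGetD l x []) 1 0 >
      PySem.List.pyGetD (PySem.List.pyGetD l (x + 1) []) 0 0)) ∘ (fun k : Nat => (k : Int)))).reverse
    with hqs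
  have hqnd : qs.Nodup := by
    rw [hqs]; exact List.nodup_reverse.mpr ((List.nodup_range).filter _)
  have hqlt : ∀ n ∈ qs, n < l.length := by
    intro n hn
    rw [hqs, List.mem_reverse, List.mem_filter] at hn
    have := List.mem_range.mp hn.1
    omega
  have hmemiff : ∀ i : Nat, i ∈ qs ↔ (i < rs.length - 1 ∧
      PySem.List.pyGetD (PySem.List.pyGetD l (i : Int) []) 1 0 >
      PySem.List.pyGetD (PySem.List.pyGetD l ((i : Int) + 1) []) 0 0) := by
    intro i
    rw [hqs, List.mem_reverse, List.mem_filter, List.mem_range]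
    simp [Function.comp]
  apply List.ext_getElem?
  intro i
  by_cases hiL : i < rs.length
  · have hrhs : ((pvClamp rs).map pvRow)[i]? =
        some (pvRow ((pvClamp rs)[i]'(by rw [pvClamp_len]; exact hiL))) := by
      rw [List.getElem?_map, List.getElem?_eq_getElem (by rw [pvClamp_len]; exact hiL)]
      rfl
    by_cases hm : i ∈ qs
    · obtain ⟨hi1, hc⟩ := (hmemiff i).mp hm
      have hi2 : i + 1 < rs.length := by omega
      have hcast : ((i : Int) + 1) = (((i + 1 : Nat)) : Int) := by push_cast; ring
      rw [pvApply_mem qs g l i hqnd hqlt hm, hrhs]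
      rw [hval i hiL, hcast, hval (i + 1) hi2, hrow1, hrow0] at hc
      rw [pvClamp_getElem rs i hiL, dif_pos hi2, if_pos hc]
      rw [hg]
      simp only [hval i hiL, hcast, hval (i + 1) hi2, hrow0]
      rfl
    · rw [pvApply_not_mem qs g l i hm, hrhs]
      have hli : l[i]? = some (pvRow (rs[i]'hiL)) := by
        rw [hl, List.getElem?_map, List.getElem?_eq_getElem hiL]; rfl
      rw [hli, pvClamp_getElem rs i hiL]
      by_cases hi2 : i + 1 < rs.length
      · have hnc : ¬ (PySem.List.pyGetD (PySem.List.pyGetD l (i : Int) []) 1 0 >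
            PySem.List.pyGetD (PySem.List.pyGetD l ((i : Int) + 1) []) 0 0) := by
          intro hc; exact hm ((hmemiff i).mpr ⟨by omega, hc⟩)
        have hcast : ((i : Int) + 1) = (((i + 1 : Nat)) : Int) := by push_cast; ring
        rw [hval i hiL, hcast, hval (i + 1) hi2, hrow1, hrow0] at hnc
        rw [dif_pos hi2, if_neg hnc]
      · rw [dif_neg hi2]
  · have hlfold : ((qs.map (fun n : Nat => ((n : Int), g n))).foldl
        (fun l p => l.set p.1.toNat p.2) l).length = l.length := pvApply_len ..
    rw [List.getElem?_eq_none (by rw [hlfold, hlen]; omega),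
        List.getElem?_eq_none (by rw [List.length_map, pvClamp_len]; omega)]

theorem pvPatch (rs : List (Int × Int)) :
    (((PySem.List.pyRange 0 (((rs.map pvRow).length : Int) - 1) 1).foldl (fun ps n =>
      if PySem.List.pyGetD (PySem.List.pyGetD (rs.map pvRow) n []) 1 0 >
         PySem.List.pyGetD (PySem.List.pyGetD (rs.map pvRow) (n + 1) []) 0 0 then
        ps ++ [(n, [PySem.List.pyGetD (PySem.List.pyGetD (rs.map pvRow) n []) 0 0,
                    PySem.List.pyGetD (PySem.List.pyGetD (rs.map pvRow) (n + 1) []) 0 0])]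
      else ps) ([] : List (Int × List Int))).reverse.foldl (fun l p => l.set p.1.toNat p.2)
        (rs.map pvRow)) = (pvClamp rs).map pvRow := by
  cases rs with
  | nil => rfl
  | cons q rest => exact pvPatchPos (q :: rest) (by simp)

theorem pvA_gen (ivs : List (List Int))
    (hpw : ivs.Pairwise (fun a b => PySem.List.pyGetD a 0 0 ≤ PySem.List.pyGetD b 0 0)) :
    (let groups : PySem.Dict Int (List Int) := ivs.foldl (fun groups item =>
        let k := PySem.List.pyGetD item 0 0
        let groups := if groups.contains k then groups else groups.insert k []
        groups.modify k [] (fun vs => vs ++ [PySem.List.pyGetD item 1 0])) PySem.Dict.empty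
     let ivs2 := groups.keys.map (fun k => [k, pvMax (groups.getD k [])])
     let patches := (PySem.List.pyRange 0 ((ivs2.length : Int) - 1) 1).foldl (fun ps n =>
        if PySem.List.pyGetD (PySem.List.pyGetD ivs2 n []) 1 0 >
           PySem.List.pyGetD (PySem.List.pyGetD ivs2 (n + 1) []) 0 0 then
          ps ++ [(n, [PySem.List.pyGetD (PySem.List.pyGetD ivs2 n []) 0 0,
                      PySem.List.pyGetD (PySem.List.pyGetD ivs2 (n + 1) []) 0 0])]
        else ps) ([] : List (Int × List Int))
     patches.reverse.foldl (fun l p => l.set p.1.toNat p.2) ivs2) = pvNorm ivs := by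
  have hxs : (ivs.map pvPair).Pairwise (fun a b => a.1 ≤ b.1) := List.pairwise_map.mpr hpw
  -- the grouping loop builds exactly the value runs of the sorted pair list
  have hfold : ivs.foldl (fun groups item =>
      let k := PySem.List.pyGetD item 0 0
      let groups := if groups.contains k then groups else groups.insert k []
      groups.modify k [] (fun vs => vs ++ [PySem.List.pyGetD item 1 0])) PySem.Dict.empty
      = PySem.Dict.mk (pvRunsVTop (ivs.map pvPair)) := by
    rw [show (fun (groups : PySem.Dict Int (List Int)) (item : List Int) =>
        let k := PySem.List.pyGetD item 0 0
        let groups := if groups.contains k then groups else groups.insert k []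
        groups.modify k [] (fun vs => vs ++ [PySem.List.pyGetD item 1 0]))
        = (fun g item => pvGStep g (pvPair item)) from rfl]
    rw [← List.foldl_map (f := pvPair) (g := pvGStep)]
    cases hx : ivs.map pvPair with
    | nil => rfl
    | cons p r =>
      obtain ⟨k, v⟩ := p
      rw [hx] at hxs
      rw [List.foldl_cons]
      rw [show pvGStep PySem.Dict.empty (k, v) = PySem.Dict.mk ([] ++ [(k, [v])]) from
        pvGStep_fresh [] k v (by simp)]
      rw [pvGroups_eq r k [v] [] (List.pairwise_cons.mp hxs).2 (List.pairwise_cons.mp hxs).1 (by simp)]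
      simp [pvRunsVTop]
  rw [hfold]
  dsimp only
  -- strictly increasing keys of the runs
  have hkeys : ((pvRunsVTop (ivs.map pvPair)).map Prod.fst).Pairwise (· < ·) := by
    cases hx : ivs.map pvPair with
    | nil => simp [pvRunsVTop]
    | cons p r =>
      obtain ⟨k, v⟩ := p
      rw [hx] at hxs
      exact pvRunsV_keys_lt r k [v] (List.pairwise_cons.mp hxs).2 (List.pairwise_cons.mp hxs).1
  have hnd : ((pvRunsVTop (ivs.map pvPair)).map Prod.fst).Nodup :=
    List.Pairwise.imp (fun h => ne_of_lt h) hkeys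
  -- the rebuild list is the (start, max end) runs, rendered as rows
  have hiv2 : (PySem.Dict.mk (pvRunsVTop (ivs.map pvPair))).keys.map
      (fun k => [k, pvMax ((PySem.Dict.mk (pvRunsVTop (ivs.map pvPair))).getD k [])])
      = (pvRuns (ivs.map pvPair)).map pvRow := by
    rw [show (PySem.Dict.mk (pvRunsVTop (ivs.map pvPair))).keys
        = (pvRunsVTop (ivs.map pvPair)).map Prod.fst from rfl]
    rw [List.map_map]
    have h1 : (pvRunsVTop (ivs.map pvPair)).map
        ((fun k => [k, pvMax ((PySem.Dict.mk (pvRunsVTop (ivs.map pvPair))).getD k [])]) ∘ Prod.fst)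
        = (pvRunsVTop (ivs.map pvPair)).map (fun q => [q.1, pvMax q.2]) := by
      apply List.map_congr_left
      intro q hq
      have hmem : (q.1, q.2) ∈ (PySem.Dict.mk (pvRunsVTop (ivs.map pvPair))).items := by
        simpa using hq
      have := PySem.Dict.getD_of_mem_items _ hmem hnd []
      simp only [Function.comp_apply, this]
    rw [h1]
    rw [show (fun q : Int × List Int => [q.1, pvMax q.2])
        = pvRow ∘ (fun q : Int × List Int => (q.1, pvMax q.2)) from rfl]
    rw [← List.map_map]
    congr 1
    cases hx : ivs.map pvPair with
    | nil => rfl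
    | cons p r =>
      obtain ⟨k, v⟩ := p
      show (pvRunsV k [v] r).map (fun q => (q.1, pvMax q.2)) = pvRunsGo k v r
      rw [pvRunsV_max r k [v] (by simp)]
      rfl
  rw [hiv2]
  exact pvPatch (pvRuns (ivs.map pvPair))

theorem pvB_gen (ivs : List (List Int))
    (hpw : ivs.Pairwise (fun a b => PySem.List.pyGetD a 0 0 ≤ PySem.List.pyGetD b 0 0)) :
    (let res := ivs.foldl
      (fun res item =>
        let s := PySem.List.pyGetD item 0 0
        let e := PySem.List.pyGetD item 1 0
        match res with
        | (k, m) :: t =>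
            if k = s then
              (if e > m then (k, e) :: t else (k, m) :: t)
            else
              let t' := if m > s then (k, s) :: t else (k, m) :: t
              (s, e) :: t'
        | [] => [(s, e)]) ([] : List (Int × Int))
     res.reverse.map (fun p => [p.1, p.2])) = pvNorm ivs := by
  show ((ivs.foldl (fun res item => pvBStep res (pvPair item)) []).reverse).map pvRow = pvNorm ivs
  rw [← List.foldl_map (f := pvPair) (g := pvBStep)]
  have hxs : (ivs.map pvPair).Pairwise (fun a b => a.1 ≤ b.1) := List.pairwise_map.mpr hpw
  unfold pvNorm
  cases hx : ivs.map pvPair with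
  | nil => simp [pvRuns, pvClamp]
  | cons p r =>
    obtain ⟨k, v⟩ := p
    rw [hx] at hxs
    rw [List.foldl_cons]
    show (r.foldl pvBStep [(k, v)]).reverse.map pvRow = _
    rw [pvBFold r k v [] (List.pairwise_cons.mp hxs).2 (List.pairwise_cons.mp hxs).1]
    simp [pvRuns]

-- ===== VERDICT (by name: the statement is the Claim_ definition above) =====
theorem shorten_overlaps_keep_start_value_spec : Claim_equal_shorten_overlaps_keep_start_value := by
  intro intervals _ _
  unfold Spec_shorten_overlaps_keep_start_value
  have hpw := PySem.List.sorted_pairwise intervals (fun k => PySem.List.pyGetD k 0 0)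
  exact (pvA_gen _ hpw).trans (pvB_gen _ hpw).symm
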